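-- pv_equiv track=rewrite | github.com/duvan51/CRM-ORGANIZADOR | backend/app/etl.py | detectar_columnas
-- ===== SOURCE A (Python) =====
-- SINONIMOS = {
--     "nombre": ["paciente", "nombre", "cliente", "usuario", "nombre_completo", "nombre_y_apellido"],
--     "fecha": ["fecha", "dia", "fec", "fecha_de_atencion", "fecha_atencion"],
--     "servicios": ["concepto", "servicio", "servicios", "procedimiento", "descripcion"]
-- }
--
-- def detectar_columnas(columnas_reales):
--     mapping = {}
--     for req, sinonimos in SINONIMOS.items():
--         for col in columnas_reales:
--             if col in sinonimos or any(s in col for s in sinonimos):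
--                 mapping[req] = col
--                 break
--     return mapping
-- ===== SOURCE B (Python) =====
-- SINONIMOS = {
--     "nombre": ["paciente", "nombre", "cliente", "usuario", "nombre_completo", "nombre_y_apellido"],
--     "fecha": ["fecha", "dia", "fec", "fecha_de_atencion", "fecha_atencion"],
--     "servicios": ["concepto", "servicio", "servicios", "procedimiento", "descripcion"]
-- }
--
-- def detectar_columnas(columnas_reales):
--     # single pass over the columns, keeping the still-unmapped required fields pending
--     pending = list(SINONIMOS.items())
--     found = {}
--     for col in columnas_reales:
--         if not pending:
--             break
--         still = []
--         for req, sins in pending: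
--             if col in sins or any(s in col for s in sins):
--                 found[req] = col
--             else:
--                 still.append((req, sins))
--         pending = still
--     return {req: found[req] for req in SINONIMOS if req in found}
-- ===== Notes on version B (the rewrite author's own statement) =====
-- stated objective: alternative
-- what changed: B replaces A's three independent restarting scans over the column list (one per required field) with a single pass over the columns that maintains a pending list of still-unmapped required fields, filling possibly several fields per column and emitting the result in SINONIMOS order at the end.
import Mathlib
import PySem

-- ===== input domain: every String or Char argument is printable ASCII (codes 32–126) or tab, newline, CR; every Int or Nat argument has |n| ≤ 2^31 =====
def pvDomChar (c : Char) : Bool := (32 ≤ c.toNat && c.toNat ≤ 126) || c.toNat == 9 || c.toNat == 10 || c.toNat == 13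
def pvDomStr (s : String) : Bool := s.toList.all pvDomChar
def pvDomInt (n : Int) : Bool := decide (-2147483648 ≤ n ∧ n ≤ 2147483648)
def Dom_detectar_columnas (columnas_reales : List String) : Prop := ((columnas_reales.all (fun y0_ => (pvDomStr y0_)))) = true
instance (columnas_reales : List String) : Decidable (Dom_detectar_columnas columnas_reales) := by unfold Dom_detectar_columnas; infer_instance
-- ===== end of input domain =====

-- B maps the required fields in one pass over the columns with a pending list of
-- still-unmapped fields, instead of A's three independent restarting scans (alternative decomposition).


-- the module-level constant SINONIMOS (dict → association list, insertion order)
def pvSinonimos : List (String × List String) :=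
  [("nombre", ["paciente", "nombre", "cliente", "usuario", "nombre_completo", "nombre_y_apellido"]),
   ("fecha", ["fecha", "dia", "fec", "fecha_de_atencion", "fecha_atencion"]),
   ("servicios", ["concepto", "servicio", "servicios", "procedimiento", "descripcion"])]

-- ===== PORT A =====
-- A's inner loop: scan the columns, break at the first matching one
def aScan (sins : List String) : List String → Option String
  | [] => none
  | col :: rest =>
    if sins.contains col || sins.any (fun s => PySem.Str.isIn s col) then some col
    else aScan sins rest

def detectar_columnas (columnas_reales : List String) : List (String × String) :=
  (pvSinonimos.foldl (fun m p =>
      match aScan p.2 columnas_reales with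
      | some col => m.insert p.1 col
      | none => m) PySem.Dict.empty).items

-- ===== PORT B =====
def bMatches (col : String) (p : String × List String) : Bool :=
  p.2.contains col || p.2.any (fun s => PySem.Str.isIn s col)

-- B's inner loop over the pending fields: record matches in found, keep the rest pending
def bColStep (col : String) (pending : List (String × List String))
    (acc : List (String × List String) × PySem.Dict String String) :
    List (String × List String) × PySem.Dict String String :=
  pending.foldl (fun a p => if bMatches col p then (a.1, a.2.insert p.1 col) else (a.1 ++ [p], a.2)) acc

-- B's outer loop over the columns ('if not pending: break')
def bLoop : List String → List (String × List String) → PySem.Dict String String → PySem.Dict String String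
  | [], _, found => found
  | _ :: _, [], found => found
  | col :: rest, p :: ps, found =>
      let st := bColStep col (p :: ps) ([], found)
      bLoop rest st.1 st.2

def detectar_columnas_alt (columnas_reales : List String) : List (String × String) :=
  let found := bLoop columnas_reales pvSinonimos PySem.Dict.empty
  (pvSinonimos.foldl (fun r p =>
      match found.get? p.1 with
      | some c => r.insert p.1 c
      | none => r) PySem.Dict.empty).items

-- ===== PRECONDITION & SPEC =====
def Spec_detectar_columnas (columnas_reales : List String) (out : List (String × String)) : Prop := out = detectar_columnas_alt columnas_reales
instance (columnas_reales : List String) (out : List (String × String)) : Decidable (Spec_detectar_columnas columnas_reales out) := by unfold Spec_detectar_columnas; infer_instance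

-- ===== CLAIM (what is proved, stated in full; the proofs are below) =====
def Claim_equal_detectar_columnas : Prop := ∀ (columnas_reales : List String), Dom_detectar_columnas columnas_reales → Spec_detectar_columnas columnas_reales (detectar_columnas columnas_reales)

-- ===== LEMMAS AND PROOFS =====

-- first match of a key in a nodup-keyed association list
theorem find?_key_eq_some_of_mem {P : List (String × List String)} {p : String × List String}
    (hnd : (P.map Prod.fst).Nodup) (hp : p ∈ P) :
    P.find? (fun q => q.1 == p.1) = some p := by
  induction P with
  | nil => cases hp
  | cons q P ih =>
    simp only [List.map_cons, List.nodup_cons] at hnd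
    rcases List.mem_cons.mp hp with rfl | hmem
    · simp [List.find?]
    · have hne : ¬ (q.1 == p.1) = true := by
        simp only [beq_iff_eq]
        intro h
        exact hnd.1 (h ▸ List.mem_map_of_mem hmem)
      simp [List.find?, hne, ih hnd.2 hmem]

theorem bColStep_fst (col : String) (P : List (String × List String))
    (L : List (String × List String)) (f : PySem.Dict String String) :
    (bColStep col P (L, f)).1 = L ++ P.filter (fun p => !bMatches col p) := by
  induction P generalizing L f with
  | nil => simp [bColStep]
  | cons q P ih =>
    by_cases h : bMatches col q
    · simpa [bColStep, List.foldl, h, List.filter] using ih L (f.insert q.1 col)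
    · simpa [bColStep, List.foldl, h, List.filter] using ih (L ++ [q]) f

theorem bColStep_get? (col : String) (P : List (String × List String))
    (L : List (String × List String)) (f : PySem.Dict String String) (req : String)
    (hnd : (P.map Prod.fst).Nodup) :
    PySem.Dict.get? (bColStep col P (L, f)).2 req =
      match P.find? (fun q => q.1 == req) with
      | some p => if bMatches col p then some col else PySem.Dict.get? f req
      | none => PySem.Dict.get? f req := by
  induction P generalizing L f with
  | nil => simp [bColStep]
  | cons q P ih =>
    simp only [List.map_cons, List.nodup_cons] at hnd
    by_cases hk : q.1 = req
    · subst hk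
      have hnone : P.find? (fun r => r.1 == q.1) = none := by
        rw [List.find?_eq_none]
        intro x hx
        simp only [beq_iff_eq]
        intro h
        exact hnd.1 (h ▸ List.mem_map_of_mem hx)
      by_cases h : bMatches col q
      · rw [show bColStep col (q :: P) (L, f) = bColStep col P (L, f.insert q.1 col) by
          simp [bColStep, List.foldl, h]]
        rw [ih L (f.insert q.1 col) hnd.2, hnone]
        simp [List.find?, h, PySem.Dict.get?_insert_self]
      · rw [show bColStep col (q :: P) (L, f) = bColStep col P (L ++ [q], f) by
          simp [bColStep, List.foldl, h]]
        rw [ih (L ++ [q]) f hnd.2, hnone]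
        simp [List.find?, h]
    · have hnb : ¬ (q.1 == req) = true := by simpa using hk
      by_cases h : bMatches col q
      · rw [show bColStep col (q :: P) (L, f) = bColStep col P (L, f.insert q.1 col) by
          simp [bColStep, List.foldl, h]]
        rw [ih L (f.insert q.1 col) hnd.2]
        have hins : PySem.Dict.get? (f.insert q.1 col) req = PySem.Dict.get? f req :=
          PySem.Dict.get?_insert_of_ne f col (fun hh => hk hh.symm)
        cases hfind : P.find? (fun r => r.1 == req) with
        | none => simp [List.find?, hnb, hfind, hins]
        | some r => simp [List.find?, hnb, hfind, hins]
      · rw [show bColStep col (q :: P) (L, f) = bColStep col P (L ++ [q], f) by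
          simp [bColStep, List.foldl, h]]
        rw [ih (L ++ [q]) f hnd.2]
        simp [List.find?, hnb]

-- the heart of the equivalence: B's found-dict lookup equals A's restarting scan
theorem bLoop_get? (cs : List String) (P : List (String × List String))
    (f : PySem.Dict String String) (req : String)
    (hnd : (P.map Prod.fst).Nodup) :
    PySem.Dict.get? (bLoop cs P f) req =
      match P.find? (fun q => q.1 == req) with
      | some p => (match aScan p.2 cs with
                   | some c => some c
                   | none => PySem.Dict.get? f req)
      | none => PySem.Dict.get? f req := by
  induction cs generalizing P f with
  | nil =>
    cases hfind : P.find? (fun q => q.1 == req) with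
    | none => simp [bLoop]
    | some p => simp [bLoop, aScan]
  | cons col rest ih =>
    cases P with
    | nil => simp [bLoop]
    | cons q P =>
      have hstep : bLoop (col :: rest) (q :: P) f
          = bLoop rest (bColStep col (q :: P) ([], f)).1 (bColStep col (q :: P) ([], f)).2 := rfl
      rw [hstep, bColStep_fst]
      have hndF : (((q :: P).filter (fun p => !bMatches col p)).map Prod.fst).Nodup :=
        hnd.sublist (List.Sublist.map Prod.fst List.filter_sublist)
      rw [List.nil_append] at *
      rw [ih _ _ hndF]
      cases hfind : (q :: P).find? (fun r => r.1 == req) with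
      | none =>
        have hall := List.find?_eq_none.mp hfind
        have hfindF : ((q :: P).filter (fun p => !bMatches col p)).find? (fun r => r.1 == req) = none := by
          rw [List.find?_eq_none]
          intro x hx
          exact hall x (List.mem_of_mem_filter hx)
        rw [hfindF]
        rw [bColStep_get? col (q :: P) [] f req hnd, hfind]
      | some p =>
        have hpmem : p ∈ q :: P := List.mem_of_find?_eq_some hfind
        have hpk : p.1 = req := by
          have := List.find?_some hfind
          simpa using this
        by_cases hm : bMatches col p
        · -- p is mapped by this column: removed from pending, found[req] = col
          have hfindF : ((q :: P).filter (fun r => !bMatches col r)).find? (fun r => r.1 == req) = none := by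
            rw [List.find?_eq_none]
            intro x hx
            simp only [beq_iff_eq]
            intro hxk
            have hxmem := List.mem_of_mem_filter hx
            have hxp : x = p := by
              have h1 := find?_key_eq_some_of_mem hnd hxmem
              rw [hxk] at h1
              rw [h1] at hfind
              exact Option.some_inj.mp hfind
            rw [List.mem_filter] at hx
            rw [hxp] at hx
            simp [hm] at hx
          rw [hfindF]
          rw [bColStep_get? col (q :: P) [] f req hnd, hfind]
          have hcond : (p.2.contains col || p.2.any (fun s => PySem.Str.isIn s col)) = true := hm
          have hsc : aScan p.2 (col :: rest) = some col := by simp only [aScan, hcond]; simp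
          simp [hm, hsc]
        · -- p stays pending; found untouched at req
          have hpmemF : p ∈ (q :: P).filter (fun r => !bMatches col r) := by
            rw [List.mem_filter]
            exact ⟨hpmem, by simp [hm]⟩
          have hfindF : ((q :: P).filter (fun r => !bMatches col r)).find? (fun r => r.1 == req) = some p := by
            have := find?_key_eq_some_of_mem hndF hpmemF
            rwa [hpk] at this
          rw [hfindF]
          rw [bColStep_get? col (q :: P) [] f req hnd, hfind]
          have hcond : (p.2.contains col || p.2.any (fun s => PySem.Str.isIn s col)) = false := by
            simpa [bMatches] using hm
          have hsc : aScan p.2 (col :: rest) = aScan p.2 rest := by simp only [aScan, hcond]; simp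
          simp [hm, hsc]

theorem pvSinonimos_keys_nodup : ((pvSinonimos.map Prod.fst).Nodup) := by decide

-- ===== VERDICT (by name: the statement is the Claim_ definition above) =====
theorem detectar_columnas_spec : Claim_equal_detectar_columnas := by
  intro cs _hdom
  unfold Spec_detectar_columnas detectar_columnas detectar_columnas_alt
  have h := fun req => bLoop_get? cs pvSinonimos PySem.Dict.empty req pvSinonimos_keys_nodup
  have hn := h "nombre"
  have hf := h "fecha"
  have hs := h "servicios"
  simp only [pvSinonimos, List.find?] at hn hf hs
  simp [PySem.Dict.get?_empty] at hn hf hs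
  simp only [pvSinonimos, List.foldl]
  rcases h1 : aScan ["paciente", "nombre", "cliente", "usuario", "nombre_completo", "nombre_y_apellido"] cs with _ | c1 <;>
  rcases h2 : aScan ["fecha", "dia", "fec", "fecha_de_atencion", "fecha_atencion"] cs with _ | c2 <;>
  rcases h3 : aScan ["concepto", "servicio", "servicios", "procedimiento", "descripcion"] cs with _ | c3 <;>
    simp only [h1, h2, h3] at hn hf hs <;>
    simp [hn, hf, hs]
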